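-- pv_equiv track=rewrite | github.com/MrBrantCode/unitest_baseline | mut_generate/mist_train_cf/cf_43581/solution.py | largest_missing_prime
-- ===== SOURCE A (Python) =====
-- def largest_missing_prime(primes):
--     def is_prime(n):
--         if n < 2:
--             return False
--         for num in range(2, int(n ** 0.5) + 1):
--             if n % num == 0:
--                 return False
--         return True
--
--     largest_missing = -1
--     for i in range(1, len(primes)):
--         for j in range(primes[i-1] + 2, primes[i], 2):
--             if is_prime(j):
--                 largest_missing = max(largest_missing, j)
--     return largest_missing
-- ===== SOURCE B (Python) =====
-- def largest_missing_prime(primes):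
--     # Interval-sieve re-implementation: for each gap, mark every composite in
--     # [lo, b) by iterating divisors d (outer) and their multiples (inner),
--     # then scan the gap's parity sequence with O(1) table lookups.
--     best = -1
--     for i in range(1, len(primes)):
--         a = primes[i - 1]
--         b = primes[i]
--         lo = a + 2
--         if lo >= b:
--             continue
--         comp = [False] * (b - lo)
--         d = 2
--         while d * d < b:
--             start = d * d
--             first = ((lo + d - 1) // d) * d
--             if first > start:
--                 start = first
--             for q in range(start, b, d):
--                 comp[q - lo] = True
--             d += 1
--         for j in range(lo, b, 2):
--             if j >= 2 and not comp[j - lo] and j > best: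
--                 best = j
--     return best
-- ===== Notes on version B (the rewrite author's own statement) =====
-- stated objective: faster
-- what changed: Replaces A's per-candidate trial division inside each gap by a per-gap interval sieve: all multiples of each divisor d (while d*d < b) are marked once in a boolean table over the gap, and the parity scan then uses O(1) table lookups.
import Mathlib
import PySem

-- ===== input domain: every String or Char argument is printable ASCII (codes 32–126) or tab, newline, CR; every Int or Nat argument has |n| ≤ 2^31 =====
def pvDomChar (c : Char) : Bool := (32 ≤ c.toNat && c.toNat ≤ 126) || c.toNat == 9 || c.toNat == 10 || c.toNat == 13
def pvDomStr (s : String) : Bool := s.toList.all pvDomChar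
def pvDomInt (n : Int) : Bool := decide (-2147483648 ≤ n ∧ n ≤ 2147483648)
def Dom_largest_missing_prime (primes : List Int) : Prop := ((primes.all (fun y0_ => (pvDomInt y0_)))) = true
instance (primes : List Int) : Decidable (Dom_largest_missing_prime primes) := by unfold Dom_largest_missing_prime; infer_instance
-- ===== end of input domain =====

-- B replaces A's per-candidate trial division inside each gap by a per-gap
-- interval sieve (mark all multiples of each divisor once, then scan the gap
-- with table lookups); same return value.

-- ===== PORT A =====
-- int(n ** 0.5): exact floor square root for the domain |n| ≤ 2^31 (n ≥ 2 at the call site)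
def isqrtInt (n : Int) : Int := Int.ofNat (Nat.sqrt n.toNat)

-- A's nested is_prime: trial division by num in range(2, int(n**0.5)+1)
def isPrimeA (n : Int) : Bool :=
  if n < 2 then false
  else (PySem.List.pyRange 2 (isqrtInt n + 1) 1).all (fun num => !(PySem.Int.mod n num == 0))

def largest_missing_prime (primes : List Int) : Int :=
  (PySem.List.pyRange 1 primes.length 1).foldl
    (fun lm i =>
      (PySem.List.pyRange (PySem.List.pyGetD primes (i - 1) 0 + 2)
          (PySem.List.pyGetD primes i 0) 2).foldl
        (fun lm j => if isPrimeA j then max lm j else lm) lm)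
    (-1)

-- ===== PORT B =====
-- helper used by markGap's termination proof (cited in decreasing_by)
theorem markGap_d_lt {d b : Int} (h : d * d < b) : d < b := by nlinarith [sq_nonneg d, sq_nonneg (d - 1)]

-- the 'while d * d < b:' marking loop of Source B: marks every q in [lo, b) that
-- has a divisor d with d*d ≤ q (comp[q - lo] = True)
def markGap (b lo : Int) (d : Int) (arr : Array Bool) : Array Bool :=
  if h : d * d < b then
    markGap b lo (d + 1)
      ((PySem.List.pyRange
          (max (d * d) (PySem.Int.floordiv (lo + d - 1) d * d)) b d).foldl
        (fun s q => s.setIfInBounds (q - lo).toNat true) arr)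
  else arr
termination_by (b - d).toNat
decreasing_by
  have := markGap_d_lt h
  omega

def largest_missing_prime_alt (primes : List Int) : Int :=
  (PySem.List.pyRange 1 primes.length 1).foldl
    (fun best i =>
      let a := PySem.List.pyGetD primes (i - 1) 0
      let b := PySem.List.pyGetD primes i 0
      if a + 2 ≥ b then best  -- 'continue' on an empty gap
      else
        let comp := markGap b (a + 2) 2 (Array.replicate (b - (a + 2)).toNat false)
        (PySem.List.pyRange (a + 2) b 2).foldl
          (fun best j =>
            -- 'if j >= 2 and not comp[j - lo] and j > best: best = j'
            if decide (2 ≤ j) && !comp.getD (j - (a + 2)).toNat false && decide (best < j)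
            then j else best) best)
    (-1)

-- ===== PRECONDITION & SPEC =====
def Spec_largest_missing_prime (primes : List Int) (out : Int) : Prop := out = largest_missing_prime_alt primes
instance (primes : List Int) (out : Int) : Decidable (Spec_largest_missing_prime primes out) := by unfold Spec_largest_missing_prime; infer_instance

-- ===== CLAIM (what is proved, stated in full; the proofs are below) =====
def Claim_equal_largest_missing_prime : Prop := ∀ (primes : List Int), Dom_largest_missing_prime primes → Spec_largest_missing_prime primes (largest_missing_prime primes)

-- ===== LEMMAS AND PROOFS =====

-- "j has no divisor d with 2 ≤ d and d*d ≤ j": the primality characterisation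
-- shared by A's trial division and B's interval sieve.
def NoDiv (j : Int) : Prop := ∀ p : Int, 2 ≤ p → p * p ≤ j → ¬ p ∣ j

-- A's trial division decides NoDiv (for n ≥ 2)
theorem isPrimeA_iff (n : Int) : isPrimeA n = true ↔ 2 ≤ n ∧ NoDiv n := by
  unfold isPrimeA
  by_cases hn : n < 2
  · rw [if_pos hn]; simp; omega
  · rw [not_lt] at hn
    rw [if_neg (by omega)]
    simp only [List.all_eq_true, PySem.List.mem_pyRange_one, Bool.not_eq_eq_eq_not, Bool.not_true,
      beq_eq_false_iff_ne, ne_eq]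
    have e2 : (n.toNat : Int) = n := by omega
    constructor
    · intro h
      refine ⟨hn, fun p hp2 hpp hdvd => ?_⟩
      have e1 : (p.toNat : Int) = p := by omega
      have h1 : p.toNat * p.toNat ≤ n.toNat := by
        have : ((p.toNat * p.toNat : Nat) : Int) ≤ ((n.toNat : Nat) : Int) := by
          push_cast
          rw [e1, e2]; exact hpp
        exact_mod_cast this
      have h2 : p.toNat ≤ Nat.sqrt n.toNat := Nat.le_sqrt.mpr h1
      have hp : p < isqrtInt n + 1 := by
        have h3 : isqrtInt n = ((Nat.sqrt n.toNat : Nat) : Int) := rfl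
        omega
      exact h p ⟨hp2, hp⟩ ((PySem.Int.mod_eq_zero_iff_dvd n p).mpr hdvd)
    · rintro ⟨-, h⟩ num ⟨h2, hlt⟩ hmod
      have e1 : (num.toNat : Int) = num := by omega
      have hle : num.toNat ≤ Nat.sqrt n.toNat := by
        have h3 : isqrtInt n = ((Nat.sqrt n.toNat : Nat) : Int) := rfl
        omega
      have h1 : num.toNat * num.toNat ≤ n.toNat := Nat.le_sqrt.mp hle
      have hnum : num * num ≤ n := by
        have h4 : ((num.toNat * num.toNat : Nat) : Int) ≤ ((n.toNat : Nat) : Int) := by exact_mod_cast h1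
        push_cast at h4
        rw [e1, e2] at h4; exact h4
      exact h num h2 hnum ((PySem.Int.mod_eq_zero_iff_dvd n num).mp hmod)

-- effect of a mark-true pass on one cell (indices in bounds)
theorem setfold_true_getD (K : List Int) (s : Array Bool) (n : Nat)
    (hK : ∀ q ∈ K, 0 ≤ q ∧ q < (s.size : Int)) :
    (K.foldl (fun s q => s.setIfInBounds q.toNat true) s).getD n false
      = (s.getD n false || K.any (fun q => q == (n : Int))) := by
  induction K generalizing s with
  | nil => simp
  | cons q K ih =>
    obtain ⟨hq0, hqs⟩ := hK q (List.mem_cons_self)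
    rw [List.foldl_cons, ih _ (fun x hx => by
      have := hK x (List.mem_cons_of_mem _ hx)
      exact ⟨this.1, by rw [Array.size_setIfInBounds]; exact this.2⟩)]
    have hcell : (s.setIfInBounds q.toNat true).getD n false
        = (s.getD n false || (q == (n : Int))) := by
      by_cases hqn : q = (n : Int)
      · have ht : q.toNat = n := by omega
        have hb : (q == (n : Int)) = true := by simpa [beq_iff_eq]
        rw [Array.getD_eq_getD_getElem?, Array.getElem?_setIfInBounds, if_pos ht, hb,
          if_pos (by omega : q.toNat < s.size)]
        simp [ht]
      · have hne : q.toNat ≠ n := by omega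
        have hb : (q == (n : Int)) = false := by simpa [beq_iff_eq]
        rw [Array.getD_eq_getD_getElem?, Array.getElem?_setIfInBounds, if_neg hne, hb]
        simp [Array.getD_eq_getD_getElem?]
    rw [hcell]
    simp [Bool.or_assoc]

-- marking preserves the table size
theorem setfold_size (K : List Int) (s : Array Bool) :
    (K.foldl (fun s q => s.setIfInBounds q.toNat true) s).size = s.size := by
  induction K generalizing s with
  | nil => rfl
  | cons q K ih => rw [List.foldl_cons, ih, Array.size_setIfInBounds]

-- one cell of the finished interval sieve
theorem markGap_getD (b lo j : Int) (hlo : lo ≤ j) (hjb : j < b) :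
    ∀ (n : Nat) (d : Int) (arr : Array Bool), 2 ≤ d → arr.size = (b - lo).toNat →
      n = (b - d).toNat →
      (((markGap b lo d arr).getD (j - lo).toNat false = true)
        ↔ (arr.getD (j - lo).toNat false = true ∨ ∃ e : Int, d ≤ e ∧ e * e ≤ j ∧ e ∣ j)) := by
  intro n
  induction n using Nat.strong_induction_on with
  | _ n ih =>
    intro d arr hd2 hsize hn
    rw [markGap]
    split
    · rename_i hdb
      have hdlt : d < b := markGap_d_lt hdb
      -- the first multiple of d that is ≥ lo
      set first := PySem.Int.floordiv (lo + d - 1) d * d with hfirst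
      have hmod := PySem.Int.floordiv_mul_add_mod (lo + d - 1) d
      have hmodrange : 0 ≤ PySem.Int.mod (lo + d - 1) d ∧ PySem.Int.mod (lo + d - 1) d < d := by
        rw [PySem.Int.mod_eq_emod_of_pos (by omega)]
        exact ⟨Int.emod_nonneg _ (by omega), Int.emod_lt_of_pos _ (by omega)⟩
      have hfirst_ge : lo ≤ first := by omega
      have hfirst_least : ∀ k : Int, lo ≤ k * d → first ≤ k * d := by
        intro k hk
        have hfk : PySem.Int.floordiv (lo + d - 1) d ≤ k := by
          by_contra hcon
          rw [not_le] at hcon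
          have h1 : k + 1 ≤ PySem.Int.floordiv (lo + d - 1) d := by omega
          have := (PySem.Int.le_floordiv_iff_mul_le (by omega : (0:Int) < d)).mp h1
          nlinarith
        rw [hfirst]
        nlinarith
      have hdvd_first : d ∣ max (d * d) first := by
        rcases max_choice (d * d) first with h | h <;> rw [h]
        · exact dvd_mul_right d d
        · exact Dvd.intro_left _ rfl
      have hlomax : lo ≤ max (d * d) first := le_trans hfirst_ge (le_max_right _ _)
      -- peel one divisor pass
      rw [ih (b - (d + 1)).toNat (by omega) (d + 1) _ (by omega)
        (by rw [← List.foldl_map (f := fun q => q - lo)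
              (g := fun (s : Array Bool) q => s.setIfInBounds q.toNat true), setfold_size]
            exact hsize) rfl]
      rw [← List.foldl_map (f := fun q => q - lo)
        (g := fun (s : Array Bool) q => s.setIfInBounds q.toNat true)]
      rw [setfold_true_getD _ _ _ (by
        intro q' hq'
        rw [List.mem_map] at hq'
        obtain ⟨q, hq, rfl⟩ := hq'
        rw [PySem.List.mem_pyRange_iff_of_pos (by omega : (0:Int) < d)] at hq
        obtain ⟨hq1, hq2, -⟩ := hq
        rw [hsize]
        omega)]
      rw [List.any_map]
      simp only [Function.comp_def]
      have hmark : ((PySem.List.pyRange (max (d * d) first) b d).any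
          (fun q => (q - lo) == (((j - lo).toNat : Nat) : Int))) = true
          ↔ (d * d ≤ j ∧ d ∣ j) := by
        have hjl : (((j - lo).toNat : Nat) : Int) = j - lo := by omega
        rw [List.any_eq_true]
        constructor
        · rintro ⟨q, hq, hqj⟩
          rw [PySem.List.mem_pyRange_iff_of_pos (by omega : (0:Int) < d)] at hq
          have hqj2 : q = j := by rw [beq_iff_eq, hjl] at hqj; omega
          subst hqj2
          have h1 : d ∣ q := by
            have := dvd_add hq.2.2 hdvd_first
            simpa using this
          exact ⟨le_trans (le_max_left _ _) hq.1, h1⟩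
        · rintro ⟨hddj, hdj⟩
          refine ⟨j, ?_, by rw [beq_iff_eq, hjl]⟩
          rw [PySem.List.mem_pyRange_iff_of_pos (by omega : (0:Int) < d)]
          obtain ⟨k, hk⟩ := hdj
          have hjfirst : first ≤ j := by
            have := hfirst_least k (by rw [mul_comm] at hk; omega)
            rw [mul_comm] at this
            omega
          exact ⟨max_le hddj hjfirst, hjb, dvd_sub (hk ▸ Dvd.intro k rfl) hdvd_first⟩
      rw [Bool.or_eq_true, hmark]
      constructor
      · rintro ((h | h) | ⟨e, he1, he2, he3⟩)
        · exact Or.inl h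
        · exact Or.inr ⟨d, le_refl d, h.1, h.2⟩
        · exact Or.inr ⟨e, by omega, he2, he3⟩
      · rintro (h | ⟨e, he1, he2, he3⟩)
        · exact Or.inl (Or.inl h)
        · rcases eq_or_lt_of_le he1 with rfl | hlt
          · exact Or.inl (Or.inr ⟨he2, he3⟩)
          · exact Or.inr ⟨e, by omega, he2, he3⟩
    · rename_i hdb
      rw [not_lt] at hdb
      constructor
      · exact Or.inl
      · rintro (h | ⟨e, he1, he2, he3⟩)
        · exact h
        · exfalso
          have : d * d ≤ e * e := by nlinarith
          omega

-- the gap's composite table agrees with A's trial division on the gap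
theorem comp_eq_isPrimeA (b lo j : Int) (hlo : lo ≤ j) (hjb : j < b) :
    (decide (2 ≤ j) && !(markGap b lo 2 (Array.replicate (b - lo).toNat false)).getD
        (j - lo).toNat false) = isPrimeA j := by
  rw [Bool.eq_iff_iff]
  have hzero : (Array.replicate (b - lo).toNat false).getD (j - lo).toNat false = false := by
    rw [Array.getD_eq_getD_getElem?, Array.getElem?_replicate]
    split <;> rfl
  have hchar := markGap_getD b lo j hlo hjb (b - 2).toNat 2
    (Array.replicate (b - lo).toNat false) (le_refl 2) (by simp) rfl
  rw [isPrimeA_iff]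
  simp only [Bool.and_eq_true, decide_eq_true_eq, Bool.not_eq_eq_eq_not, Bool.not_true]
  constructor
  · rintro ⟨h2j, hcomp⟩
    refine ⟨h2j, fun p hp2 hpp hdvd => ?_⟩
    have : (markGap b lo 2 (Array.replicate (b - lo).toNat false)).getD (j - lo).toNat false
        = true := hchar.mpr (Or.inr ⟨p, hp2, hpp, hdvd⟩)
    rw [this] at hcomp
    cases hcomp
  · rintro ⟨h2j, hnd⟩
    refine ⟨h2j, ?_⟩
    rw [Bool.eq_false_iff]
    intro hmk
    rcases hchar.mp hmk with h | ⟨e, he1, he2, he3⟩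
    · rw [hzero] at h; cases h
    · exact hnd e he1 he2 he3

-- ===== VERDICT (by name: the statement is the Claim_ definition above) =====
theorem largest_missing_prime_spec : Claim_equal_largest_missing_prime := by
  intro primes _
  unfold Spec_largest_missing_prime largest_missing_prime largest_missing_prime_alt
  apply PySem.List.foldl_congr_mem
  intro best i _
  dsimp only
  by_cases hgap : PySem.List.pyGetD primes (i - 1) 0 + 2 ≥ PySem.List.pyGetD primes i 0
  · rw [if_pos hgap]
    have hnil : PySem.List.pyRange (PySem.List.pyGetD primes (i - 1) 0 + 2)
        (PySem.List.pyGetD primes i 0) 2 = [] := by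
      rw [PySem.List.pyRange_of_pos _ _ (by omega : (0:Int) < 2), if_neg (by omega)]
      rfl
    rw [hnil]
    rfl
  · rw [if_neg hgap]
    apply PySem.List.foldl_congr_mem
    intro best' j hj
    rw [PySem.List.mem_pyRange_iff_of_pos (by omega : (0:Int) < 2)] at hj
    rw [← comp_eq_isPrimeA (PySem.List.pyGetD primes i 0)
      (PySem.List.pyGetD primes (i - 1) 0 + 2) j hj.1 hj.2.1]
    by_cases hP : (decide (2 ≤ j) && !(markGap (PySem.List.pyGetD primes i 0)
        (PySem.List.pyGetD primes (i - 1) 0 + 2) 2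
        (Array.replicate (PySem.List.pyGetD primes i 0
          - (PySem.List.pyGetD primes (i - 1) 0 + 2)).toNat false)).getD
        (j - (PySem.List.pyGetD primes (i - 1) 0 + 2)).toNat false) = true
    · rw [hP]
      simp only [Bool.true_and, if_true]
      by_cases hbj : best' < j
      · rw [if_pos (by simpa using hbj), max_eq_right (by omega)]
      · rw [if_neg (by simpa using hbj), max_eq_left (by omega)]
    · rw [Bool.not_eq_true] at hP
      rw [hP]
      simp
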